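-- pv_equiv track=rewrite | github.com/hth810/pythonlc | 周赛/自己/不相交子字符串的最大数量.py | maxSubstrings
-- ===== SOURCE A (Python) =====
-- from bisect import bisect_right
-- from collections import defaultdict
--
-- def maxSubstrings(word: str) -> int:
--     cnt=defaultdict(list)
--     for i,c in enumerate(word):
--         cnt[c].append(i)
--     tmp=[]
--     for c in cnt:
--         pos=cnt[c]
--         n=len(pos)
--         for j in range(n):
--             cur=pos[j]
--             i=bisect_right(pos,cur-3,0,j)-1
--             if i>=0:
--                 st=pos[i]
--                 e=cur
--                 if e-st+1>=4:
--                     tmp.append((st,e))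
--     tmp.sort(key=lambda x:x[1])
--     res=0
--     l=-1
--     for m,n in tmp:
--         if m>l:
--             res+=1
--             l=n
--     return res
-- ===== SOURCE B (Python) =====
-- def maxSubstrings(word: str) -> int:
--     # One pass, O(1) per character: when reaching index e, record position e-3
--     # for its character, so last[c] is the rightmost position of c that is <= e-3.
--     # A greedy interval ending at e is available iff last[word[e]] lies after the
--     # previous chosen end; take it immediately (ends are scanned in increasing order).
--     last = {}
--     res = 0
--     l = -1
--     for e, c in enumerate(word):
--         if e >= 3:
--             last[word[e - 3]] = e - 3
--         if last.get(c, -1) > l: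
--             res += 1
--             l = e
--     return res
-- ===== Notes on version B (the rewrite author's own statement) =====
-- stated objective: faster
-- what changed: Replaced the per-character position lists with binary searches plus a global sort-and-greedy by a single left-to-right pass that keeps, per character, the rightmost occurrence at distance >= 3 in a dict and greedily takes an interval as soon as its start lies beyond the last chosen end, so the position lists, the bisect calls and the sort disappear.
import Mathlib
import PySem

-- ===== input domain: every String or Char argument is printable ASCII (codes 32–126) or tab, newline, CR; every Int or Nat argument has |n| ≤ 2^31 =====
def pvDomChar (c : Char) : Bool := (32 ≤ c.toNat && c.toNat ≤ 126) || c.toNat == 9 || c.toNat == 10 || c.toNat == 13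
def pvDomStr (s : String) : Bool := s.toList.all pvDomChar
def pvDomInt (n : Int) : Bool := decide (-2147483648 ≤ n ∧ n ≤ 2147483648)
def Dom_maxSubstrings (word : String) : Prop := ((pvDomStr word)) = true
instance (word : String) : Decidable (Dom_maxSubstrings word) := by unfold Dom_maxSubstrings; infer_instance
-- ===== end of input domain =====

-- B replaces A's per-character position lists + bisect + global sort-and-greedy by one
-- left-to-right pass keeping, per character, the rightmost occurrence at distance ≥ 3 (objective: faster).

-- ===== PORT A =====
-- inner loop body of A: for j in range(n): cur=pos[j]; i=bisect_right(pos,cur-3,0,j)-1; …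
-- bisect_right(pos, x, 0, j) has lo=0, hi=j, i.e. it searches the prefix pos[:j] (= pos.take j).
def bodyA (pos : List Int) (tmp : List (Int × Int)) (j : Int) : List (Int × Int) :=
  let cur := PySem.List.pyGetD pos j 0
  let i : Int := (PySem.List.bisectRight (pos.take j.toNat) (cur - 3) : Int) - 1
  if i ≥ 0 then
    let st := PySem.List.pyGetD pos i 0
    if cur - st + 1 ≥ 4 then tmp ++ [(st, cur)] else tmp
  else tmp

def maxSubstrings (word : String) : Int :=
  let cnt := (PySem.List.enumerate word.toList 0).foldl
      (fun d p => d.modify p.2 [] (fun l => l ++ [p.1])) PySem.Dict.empty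
  let tmp := cnt.keys.foldl (fun tmp c =>
      (PySem.List.pyRange 0 (((cnt.getD c []).length : Int)) 1).foldl (bodyA (cnt.getD c [])) tmp) []
  let tmp2 := PySem.List.sorted tmp (fun x => x.2)
  (tmp2.foldl (fun s p => if p.1 > s.2 then (s.1 + 1, p.2) else s) ((0 : Int), (-1 : Int))).1

-- ===== PORT B =====
-- loop body of B, state (last, res, l); word[e-3] is always in range when e ≥ 3, so pyGetD is exact
def bodyB (cs : List Char) (s : PySem.Dict Char Int × Int × Int) (p : Int × Char) :
    PySem.Dict Char Int × Int × Int :=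
  let last := if p.1 ≥ 3 then s.1.insert (PySem.List.pyGetD cs (p.1 - 3) ' ') (p.1 - 3) else s.1
  if last.getD p.2 (-1) > s.2.2 then (last, s.2.1 + 1, p.1) else (last, s.2.1, s.2.2)

def maxSubstrings_alt (word : String) : Int :=
  ((PySem.List.enumerate word.toList 0).foldl (bodyB word.toList)
      (PySem.Dict.empty, (0 : Int), (-1 : Int))).2.1

-- ===== PRECONDITION & SPEC =====
def Spec_maxSubstrings (word : String) (out : Int) : Prop := out = maxSubstrings_alt word
instance (word : String) (out : Int) : Decidable (Spec_maxSubstrings word out) := by unfold Spec_maxSubstrings; infer_instance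

-- ===== CLAIM (what is proved, stated in full; the proofs are below) =====
def Claim_equal_maxSubstrings : Prop := ∀ (word : String), Dom_maxSubstrings word → Spec_maxSubstrings word (maxSubstrings word)

-- ===== LEMMAS AND PROOFS =====

-- prevLeN cs c k = the largest index q < k with cs[q] = c, as an Int, or -1 if there is none
def prevLeN (cs : List Char) (c : Char) : Nat → Int
  | 0 => -1
  | k + 1 => if h : k < cs.length then (if cs[k] = c then (k : Int) else prevLeN cs c k) else prevLeN cs c k

-- the interval contributed at end position p.1 (character p.2), if any
def Fint (cs : List Char) (p : Int × Char) : Option (Int × Int) :=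
  if prevLeN cs p.2 (p.1 - 2).toNat ≥ 0 then some (prevLeN cs p.2 (p.1 - 2).toNat, p.1) else none

-- all intervals, listed in increasing order of their (distinct) end positions
def ideal (cs : List Char) : List (Int × Int) :=
  (PySem.List.enumerate cs 0).filterMap (Fint cs)

-- B's greedy step with the dict eliminated
def bstep (cs : List Char) (s : Int × Int) (p : Int × Char) : Int × Int :=
  if prevLeN cs p.2 ((p.1 - 2).toNat) > s.2 then (s.1 + 1, p.1) else s

-- the (increasing) list of positions of character c, as A builds it
def posOf (cs : List Char) (c : Char) : List Int :=
  ((PySem.List.enumerate cs 0).filter (fun p => p.2 == c)).map (fun p => p.1)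

lemma prevLeN_mem (cs : List Char) (c : Char) (k : Nat) :
    prevLeN cs c k = -1 ∨
      ∃ (q : Nat) (h : q < cs.length), q < k ∧ cs[q] = c ∧ prevLeN cs c k = (q : Int) := by
  induction k with
  | zero => left; rfl
  | succ k ih =>
    unfold prevLeN
    split
    · rename_i h
      split
      · rename_i hc
        right; exact ⟨k, h, Nat.lt_succ_self k, hc, rfl⟩
      · rcases ih with h1 | ⟨q, hq, hqk, hc, he⟩
        · left; exact h1
        · right; exact ⟨q, hq, Nat.lt_succ_of_lt hqk, hc, he⟩
    · rcases ih with h1 | ⟨q, hq, hqk, hc, he⟩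
      · left; exact h1
      · right; exact ⟨q, hq, Nat.lt_succ_of_lt hqk, hc, he⟩

lemma prevLeN_max (cs : List Char) (c : Char) (k : Nat) (q : Nat) (hq : q < cs.length)
    (hqk : q < k) (hc : cs[q] = c) : (q : Int) ≤ prevLeN cs c k := by
  induction k with
  | zero => omega
  | succ k ih =>
    unfold prevLeN
    rcases Nat.lt_or_ge q k with h | h
    · split
      · split
        · rename_i hk hck
          exact le_of_lt (by exact_mod_cast h)
        · exact ih h
      · exact ih h
    · have hq' : q = k := by omega
      subst hq'
      rw [dif_pos hq, if_pos hc]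

lemma prevLeN_neg_one_le (cs : List Char) (c : Char) (k : Nat) : -1 ≤ prevLeN cs c k := by
  rcases prevLeN_mem cs c k with h | ⟨q, _, _, _, h⟩ <;> rw [h] <;> omega

lemma posOf_pairwise (cs : List Char) (c : Char) : (posOf cs c).Pairwise (· < ·) := by
  unfold posOf
  rw [List.pairwise_map]
  exact ((PySem.List.pairwise_lt_enumerate cs 0).filter _)

lemma mem_posOf (cs : List Char) (c : Char) (q : Int) :
    q ∈ posOf cs c ↔ ∃ (i : Nat) (h : i < cs.length), cs[i] = c ∧ q = (i : Int) := by
  unfold posOf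
  simp only [List.mem_map, List.mem_filter, PySem.List.mem_enumerate_iff]
  constructor
  · rintro ⟨p, ⟨⟨i, hi, rfl⟩, hc⟩, rfl⟩
    exact ⟨i, hi, by simpa using hc, by simp⟩
  · rintro ⟨i, hi, hc, rfl⟩
    exact ⟨((i : Int), cs[i]), ⟨⟨i, hi, by simp⟩, by simpa using hc⟩, rfl⟩

lemma posOf_nonneg (cs : List Char) (c : Char) (q : Int) (h : q ∈ posOf cs c) : 0 ≤ q := by
  rcases (mem_posOf cs c q).mp h with ⟨i, _, _, rfl⟩; positivity

-- the body of A's inner loop at index m computes exactly the optional interval Fint at end pos[m]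
lemma stepA (cs : List Char) (c : Char) (m : Nat) (hm : m < (posOf cs c).length)
    (tmp : List (Int × Int)) :
    bodyA (posOf cs c) tmp (m : Int)
      = tmp ++ (Fint cs ((posOf cs c)[m], c)).toList := by
  have hsorted := posOf_pairwise cs c
  have hmono := List.pairwise_iff_getElem.mp hsorted
  unfold bodyA
  have htn : ((m : Int)).toNat = m := Int.toNat_natCast m
  have hcur : PySem.List.pyGetD (posOf cs c) (m : Int) 0 = (posOf cs c)[m] := by
    rw [PySem.List.pyGetD_natCast, List.getD_eq_getElem _ _ hm]
  rw [htn, hcur]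
  have hprelen : ((posOf cs c).take m).length = m := by
    simp [List.length_take, Nat.min_eq_left hm.le]
  have hple : ((posOf cs c).take m).Pairwise (· ≤ ·) :=
    (List.Pairwise.sublist (List.take_sublist m (posOf cs c)) hsorted).imp le_of_lt
  obtain ⟨hk1, hk2, hk3⟩ :=
    PySem.List.bisectRight_spec ((posOf cs c).take m) ((posOf cs c)[m] - 3) hple
  set k := PySem.List.bisectRight ((posOf cs c).take m) ((posOf cs c)[m] - 3) with hkdef
  rw [hprelen] at hk1
  -- every element of pos that is ≤ pos[m] - 3 sits at an index < k
  have hidx : ∀ (i : Nat) (hi : i < (posOf cs c).length),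
      (posOf cs c)[i] ≤ (posOf cs c)[m] - 3 → i < k := by
    intro i hi hle
    by_contra hcon
    rcases Nat.lt_or_ge i k with h | hcon'
    · exact hcon h
    · have him : i < m := by
        rcases Nat.lt_trichotomy i m with h' | h' | h'
        · exact h'
        · subst h'; omega
        · have := hmono m i hm hi h'; omega
      have h3 := hk3 i (by omega) hcon'
      rw [List.getElem_take] at h3
      omega
  rcases Nat.eq_zero_or_pos k with hk0 | hkpos
  · rw [if_neg (by omega : ¬ ((k : Int) - 1 ≥ 0))]
    have hnone : Fint cs ((posOf cs c)[m], c) = none := by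
      unfold Fint
      rw [if_neg]
      intro habs
      rcases prevLeN_mem cs c (((posOf cs c)[m] - 2).toNat) with he | ⟨q, hq, hqk, hcq, he⟩
      · rw [he] at habs; omega
      · have hq3 : (q : Int) ≤ (posOf cs c)[m] - 3 := by omega
        have hmem : (q : Int) ∈ posOf cs c := (mem_posOf cs c _).mpr ⟨q, hq, hcq, rfl⟩
        obtain ⟨i, hi, hie⟩ := List.mem_iff_getElem.mp hmem
        have := hidx i hi (by rw [hie]; omega)
        omega
    rw [hnone]
    simp
  · rw [if_pos (by omega : ((k : Int) - 1 ≥ 0))]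
    have hkm : k - 1 < (posOf cs c).length := by omega
    have hst : PySem.List.pyGetD (posOf cs c) ((k : Int) - 1) 0 = (posOf cs c)[k - 1] := by
      have h1 : (k : Int) - 1 = ((k - 1 : Nat) : Int) := by omega
      rw [h1, PySem.List.pyGetD_natCast, List.getD_eq_getElem _ _ hkm]
    rw [hst]
    have hstle : (posOf cs c)[k - 1] ≤ (posOf cs c)[m] - 3 := by
      have h2 := hk2 (k - 1) (by omega) (by omega)
      rwa [List.getElem_take] at h2
    have hstnn : 0 ≤ (posOf cs c)[k - 1] :=
      posOf_nonneg cs c _ (List.getElem_mem hkm)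
    obtain ⟨q0, hq0, hc0, he0⟩ := (mem_posOf cs c ((posOf cs c)[k - 1])).mp (List.getElem_mem hkm)
    have hvk : q0 < (((posOf cs c)[m] - 2)).toNat := by omega
    have hlow := prevLeN_max cs c (((posOf cs c)[m] - 2).toNat) q0 hq0 hvk hc0
    have hhigh : prevLeN cs c (((posOf cs c)[m] - 2).toNat) ≤ (posOf cs c)[k - 1] := by
      rcases prevLeN_mem cs c (((posOf cs c)[m] - 2).toNat) with he | ⟨q', hq', hq'k, hc', he'⟩
      · rw [he]; omega
      · rw [he']
        have hq'3 : (q' : Int) ≤ (posOf cs c)[m] - 3 := by omega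
        have hmem' : (q' : Int) ∈ posOf cs c := (mem_posOf cs c _).mpr ⟨q', hq', hc', rfl⟩
        obtain ⟨i', hi', hie'⟩ := List.mem_iff_getElem.mp hmem'
        have hik : i' < k := hidx i' hi' (by rw [hie']; omega)
        rcases Nat.lt_or_ge i' (k - 1) with h' | h'
        · have := hmono i' (k - 1) hi' hkm h'
          omega
        · have h'' : i' = k - 1 := by omega
          subst h''
          rw [hie']
    have hv : prevLeN cs c (((posOf cs c)[m] - 2).toNat) = (posOf cs c)[k - 1] := by
      rw [he0] at hhigh ⊢
      omega
    have hFs : Fint cs ((posOf cs c)[m], c) = some ((posOf cs c)[k - 1], (posOf cs c)[m]) := by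
      unfold Fint
      rw [if_pos (by rw [hv]; omega)]
      rw [hv]
    rw [if_pos (by omega : (posOf cs c)[m] - (posOf cs c)[k - 1] + 1 ≥ 4), hFs]
    simp

-- A's inner loop over range(len(pos)) collects the optional intervals of all ends in pos
lemma innerA (cs : List Char) (c : Char) (tmp : List (Int × Int)) :
    (PySem.List.pyRange 0 (((posOf cs c).length : Int)) 1).foldl (bodyA (posOf cs c)) tmp
      = tmp ++ (posOf cs c).filterMap (fun cur => Fint cs (cur, c)) := by
  suffices h : ∀ m : Nat, m ≤ (posOf cs c).length →
      (PySem.List.pyRange 0 ((m : Int)) 1).foldl (bodyA (posOf cs c)) tmp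
        = tmp ++ ((posOf cs c).take m).filterMap (fun cur => Fint cs (cur, c)) by
    have := h (posOf cs c).length le_rfl
    rwa [List.take_length] at this
  intro m
  induction m with
  | zero =>
    intro _
    rw [show ((0 : Nat) : Int) = 0 by norm_num, PySem.List.pyRange_one_eq_nil le_rfl]
    simp
  | succ m ih =>
    intro hm1
    have hm : m < (posOf cs c).length := by omega
    rw [show ((m + 1 : Nat) : Int) = (m : Int) + 1 by push_cast; ring]
    rw [PySem.List.pyRange_one_succ_right (by positivity : (0 : Int) ≤ (m : Int))]
    rw [List.foldl_append, ih (by omega)]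
    simp only [List.foldl_cons, List.foldl_nil]
    rw [stepA cs c m hm]
    rw [List.append_assoc]
    congr 1
    rw [List.take_add_one, List.getElem?_eq_getElem hm, List.filterMap_append]
    rcases hF : Fint cs ((posOf cs c)[m], c) with _ | pr <;> simp [hF]

-- swapped-key twin of PySem.Dict.getD_foldl_modify_append (A's grouping pairs are (position, char))
lemma getD_foldl_modify_append_snd (c : Char) :
    ∀ (l : List (Int × Char)) (d : PySem.Dict Char (List Int)),
      (l.foldl (fun d p => d.modify p.2 [] (fun xs => xs ++ [p.1])) d).getD c []
        = d.getD c [] ++ (l.filter (fun p => p.2 == c)).map (fun p => p.1) := by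
  intro l
  induction l with
  | nil => intro d; simp
  | cons p l ih =>
    intro d
    rw [List.foldl_cons, ih, List.filter_cons]
    by_cases h : p.2 = c
    · rw [if_pos (by simpa using h)]
      rw [PySem.Dict.getD_modify]
      rw [if_pos h.symm, List.map_cons]
      simp [h]
    · rw [if_neg (by simpa using h)]
      rw [PySem.Dict.getD_modify, if_neg (fun hh => h hh.symm)]

-- A's grouping dict: cnt[c] is the increasing list of positions of c
lemma cnt_getD (cs : List Char) (c : Char) :
    (((PySem.List.enumerate cs 0).foldl
        (fun d p => d.modify p.2 [] (fun l => l ++ [p.1])) PySem.Dict.empty).getD c [])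
      = posOf cs c := by
  rw [getD_foldl_modify_append_snd c (PySem.List.enumerate cs 0) PySem.Dict.empty]
  have : (PySem.Dict.empty : PySem.Dict Char (List Int)).getD c [] = [] := by
    simp [PySem.Dict.getD, PySem.Dict.empty, PySem.Dict.get?]
  rw [this, List.nil_append]
  rfl

lemma cnt_keys (cs : List Char) :
    ((PySem.List.enumerate cs 0).foldl
        (fun d p => d.modify p.2 [] (fun l => l ++ [p.1])) PySem.Dict.empty).keys
      = PySem.Set.ofList cs := by
  have h := PySem.Dict.keys_foldl_modify_key (PySem.List.enumerate cs 0)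
      (fun p : Int × Char => p.2) ([] : List Int) (fun _ p l => l ++ [p.1]) PySem.Dict.empty
  rw [PySem.List.map_snd_enumerate] at h
  have h2 : PySem.Set.update (PySem.Dict.empty : PySem.Dict Char (List Int)).keys cs
      = PySem.Set.ofList cs := by
    simp [PySem.Set.update, PySem.Set.ofList_eq_foldl, PySem.Dict.empty, PySem.Dict.keys]
  rw [h2] at h
  exact h

lemma empty_getD (c : Char) : (PySem.Dict.empty : PySem.Dict Char Int).getD c (-1) = -1 := by
  simp [PySem.Dict.getD, PySem.Dict.empty, PySem.Dict.get?]

-- per-character interval list, re-expressed over the filtered enumeration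
lemma perchar (cs : List Char) (c : Char) :
    (posOf cs c).filterMap (fun cur => Fint cs (cur, c))
      = ((PySem.List.enumerate cs 0).filter (fun p => p.2 == c)).filterMap (Fint cs) := by
  unfold posOf
  rw [List.filterMap_map]
  apply List.filterMap_congr
  intro p hp
  have hc : p.2 = c := by simpa using (List.mem_filter.mp hp).2
  show Fint cs (p.1, c) = Fint cs p
  rw [← hc]

-- concatenating the classes of a nodup, covering key list is a permutation of the list
lemma flatMap_filter_perm {α κ : Type} [BEq κ] [LawfulBEq κ] (key : α → κ) :
    ∀ (K : List κ) (l : List α), K.Nodup → (∀ a ∈ l, key a ∈ K) →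
      (K.flatMap (fun c => l.filter (fun a => key a == c))).Perm l := by
  intro K
  induction K with
  | nil =>
    intro l _ hcov
    have : l = [] := List.eq_nil_iff_forall_not_mem.mpr (fun a ha => by simpa using hcov a ha)
    subst this; simp
  | cons c K' ih =>
    intro l hnd hcov
    rcases List.nodup_cons.mp hnd with ⟨hc, hnd'⟩
    rw [List.flatMap_cons]
    have hcongr : ∀ c' ∈ K',
        l.filter (fun a => key a == c')
          = (l.filter (fun a => !(key a == c))).filter (fun a => key a == c') := by
      intro c' hc'
      rw [List.filter_filter]
      apply List.filter_congr
      intro a _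
      by_cases h : key a = c'
      · have hne : c' ≠ c := fun hh => hc (hh ▸ hc')
        simp [h]
        exact hne
      · simp [h]
    have hflat : K'.flatMap (fun c' => l.filter (fun a => key a == c'))
        = K'.flatMap (fun c' => (l.filter (fun a => !(key a == c))).filter (fun a => key a == c')) := by
      unfold List.flatMap
      rw [List.map_congr_left hcongr]
    rw [hflat]
    have hcov' : ∀ a ∈ l.filter (fun a => !(key a == c)), key a ∈ K' := by
      intro a ha
      rcases List.mem_filter.mp ha with ⟨hal, hne⟩
      rcases List.mem_cons.mp (hcov a hal) with h | h
      · simp [h] at hne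
      · exact h
    refine List.Perm.trans ?_ (List.filter_append_perm (fun a => key a == c) l)
    exact (ih _ hnd' hcov').append_left _

lemma ideal_pairwise (cs : List Char) :
    (ideal cs).Pairwise (fun a b => a.2 < b.2) := by
  unfold ideal
  rw [List.pairwise_filterMap]
  refine (PySem.List.pairwise_lt_enumerate cs 0).imp ?_
  intro a b hab b1 h1 b2 h2
  unfold Fint at h1 h2
  split at h1
  · split at h2
    · injection h1 with h1
      injection h2 with h2
      rw [← h1, ← h2]
      simpa using hab
    · exact absurd h2 (by simp)
  · exact absurd h1 (by simp)

-- sorting A's tmp by interval end yields the end-ordered interval list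
lemma sorted_tmp (cs : List Char) :
    PySem.List.sorted
        ((PySem.Set.ofList cs).flatMap
          (fun c => (posOf cs c).filterMap (fun cur => Fint cs (cur, c))))
        (fun x => x.2)
      = ideal cs := by
  apply PySem.List.sorted_eq_of_perm_of_pairwise_lt _ _ _ ?_ (ideal_pairwise cs)
  simp only [perchar]
  rw [← List.filterMap_flatMap]
  have hperm : ((PySem.Set.ofList cs).flatMap
      (fun c => (PySem.List.enumerate cs 0).filter (fun p => p.2 == c))).Perm
      (PySem.List.enumerate cs 0) := by
    apply flatMap_filter_perm (fun p : Int × Char => p.2)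
    · exact PySem.Set.nodup_ofList cs
    · intro p hp
      rcases (PySem.List.mem_enumerate_iff cs 0 p).mp hp with ⟨k, hk, rfl⟩
      exact (PySem.Set.mem_ofList cs _).mpr (List.getElem_mem hk)
  exact (hperm.filterMap (Fint cs)).symm

-- B's dict always holds prevLeN, so the dict can be eliminated from B's fold
lemma Bfold (cs : List Char) : ∀ (ks : List Char) (k : Nat) (d : PySem.Dict Char Int) (s : Int × Int),
    ks = cs.drop k → (∀ c, d.getD c (-1) = prevLeN cs c (k - 3)) →
    ((PySem.List.enumerate ks (k : Int)).foldl (bodyB cs) (d, s)).2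
      = (PySem.List.enumerate ks (k : Int)).foldl (bstep cs) s := by
  intro ks
  induction ks with
  | nil => intro k d s _ _; rfl
  | cons x ks ih =>
    intro k d s hks hinv
    have hk : k < cs.length := by
      by_contra h
      rw [List.drop_eq_nil_of_le (by omega)] at hks
      exact List.cons_ne_nil x ks hks
    rw [List.drop_eq_getElem_cons hk] at hks
    injection hks with hx hks
    rw [PySem.List.enumerate_cons]
    simp only [List.foldl_cons]
    set d' := if (k : Int) ≥ 3 then
        d.insert (PySem.List.pyGetD cs ((k : Int) - 3) ' ') ((k : Int) - 3) else d with hd'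
    have hinv' : ∀ c, d'.getD c (-1) = prevLeN cs c ((k + 1) - 3) := by
      intro c
      by_cases h3 : (3 : Int) ≤ (k : Int)
      · have hk3 : k - 3 < cs.length := by omega
        have hcast : ((k : Int) - 3) = ((k - 3 : Nat) : Int) := by omega
        rw [hd', if_pos h3, hcast, PySem.List.pyGetD_natCast,
            List.getD_eq_getElem _ _ hk3, PySem.Dict.getD_insert]
        have hsucc : (k + 1) - 3 = (k - 3) + 1 := by omega
        rw [hsucc]
        rw [show prevLeN cs c ((k - 3) + 1)
              = if h : k - 3 < cs.length then
                  (if cs[k - 3] = c then ((k - 3 : Nat) : Int) else prevLeN cs c (k - 3))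
                else prevLeN cs c (k - 3) from rfl]
        rw [dif_pos hk3]
        by_cases hcc : c = cs[k - 3]
        · rw [if_pos hcc, if_pos hcc.symm]
        · rw [if_neg hcc, if_neg (fun hh => hcc hh.symm), hinv c]
      · have heq : (k + 1) - 3 = k - 3 := by omega
        rw [hd', if_neg h3, heq, hinv c]
    have hstep : bodyB cs (d, s) ((k : Int), x) = (d', bstep cs s ((k : Int), x)) := by
      unfold bodyB bstep
      subst hx
      simp only [← hd']
      have hg : d'.getD cs[k] (-1) = prevLeN cs cs[k] (((k : Int) - 2)).toNat := by
        rw [hinv' cs[k]]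
        congr 1
        omega
      rw [hg]
      by_cases hgt : prevLeN cs cs[k] (((k : Int) - 2)).toNat > s.2
      · rw [if_pos hgt, if_pos hgt]
      · rw [if_neg hgt, if_neg hgt]
    rw [hstep]
    have hcast1 : (k : Int) + 1 = ((k + 1 : Nat) : Int) := by push_cast; ring
    rw [hcast1]
    exact ih (k + 1) d' (bstep cs s ((k : Int), x)) hks hinv'

-- the greedy pass over all ends equals the greedy pass over the end-ordered interval list
lemma greedy (cs : List Char) : ∀ (l : List (Int × Char)) (s : Int × Int), -1 ≤ s.2 →
    (∀ p ∈ l, 0 ≤ p.1) →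
    l.foldl (bstep cs) s
      = (l.filterMap (Fint cs)).foldl (fun s p => if p.1 > s.2 then (s.1 + 1, p.2) else s) s := by
  intro l
  induction l with
  | nil => intro s _ _; rfl
  | cons p l ih =>
    intro s hs hpos
    have h0 : 0 ≤ p.1 := hpos p List.mem_cons_self
    rw [List.foldl_cons, List.filterMap_cons]
    by_cases hv : prevLeN cs p.2 (p.1 - 2).toNat ≥ 0
    · have hF : Fint cs p = some (prevLeN cs p.2 (p.1 - 2).toNat, p.1) := by
        unfold Fint; rw [if_pos hv]
      rw [hF]
      simp only [List.foldl_cons]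
      by_cases hgt : prevLeN cs p.2 (p.1 - 2).toNat > s.2
      · have h1 : bstep cs s p = (s.1 + 1, p.1) := by unfold bstep; rw [if_pos hgt]
        rw [h1, if_pos hgt]
        exact ih _ (by show -1 ≤ p.1; omega) (fun q hq => hpos q (List.mem_cons_of_mem _ hq))
      · have h1 : bstep cs s p = s := by unfold bstep; rw [if_neg hgt]
        rw [h1, if_neg hgt]
        exact ih _ hs (fun q hq => hpos q (List.mem_cons_of_mem _ hq))
    · have hveq : prevLeN cs p.2 (p.1 - 2).toNat = -1 := by
        have := prevLeN_neg_one_le cs p.2 (p.1 - 2).toNat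
        omega
      have hF : Fint cs p = none := by unfold Fint; rw [if_neg hv]
      rw [hF]
      have h1 : bstep cs s p = s := by
        unfold bstep
        rw [if_neg (by omega : ¬ prevLeN cs p.2 (p.1 - 2).toNat > s.2)]
      rw [h1]
      exact ih _ hs (fun q hq => hpos q (List.mem_cons_of_mem _ hq))

lemma maxSubstrings_eq (word : String) : maxSubstrings word = maxSubstrings_alt word := by
  simp only [maxSubstrings, maxSubstrings_alt]
  simp only [cnt_getD, cnt_keys, innerA]
  simp only [PySem.List.foldl_append_eq_flatMap, List.nil_append]
  rw [sorted_tmp]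
  have hB := Bfold word.toList word.toList 0 PySem.Dict.empty ((0 : Int), (-1 : Int))
      (by rw [List.drop_zero]) (fun c => by rw [empty_getD]; rfl)
  rw [show ((0 : Nat) : Int) = 0 by norm_num] at hB
  rw [show ((PySem.List.enumerate word.toList 0).foldl (bodyB word.toList)
        (PySem.Dict.empty, (0 : Int), (-1 : Int))).2.1
      = (((PySem.List.enumerate word.toList 0).foldl (bodyB word.toList)
        (PySem.Dict.empty, (0 : Int), (-1 : Int))).2).1 from rfl]
  rw [hB]
  rw [greedy word.toList (PySem.List.enumerate word.toList 0) ((0 : Int), (-1 : Int))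
      (by norm_num)
      (fun p hp => by
        rcases (PySem.List.mem_enumerate_iff word.toList 0 p).mp hp with ⟨k, hk, rfl⟩
        positivity)]
  rfl

-- ===== VERDICT (by name: the statement is the Claim_ definition above) =====
theorem maxSubstrings_spec : Claim_equal_maxSubstrings := by
  intro word _
  unfold Spec_maxSubstrings
  exact maxSubstrings_eq word
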